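-- pv_equiv track=rewrite | github.com/niart120/spss_draw | spss_draw/draw_3d.py | _compute_wall_segments
-- ===== SOURCE A (Python) =====
-- def _compute_wall_segments(
--     size: int,
--     tiles: list[tuple[int, int, int]],
-- ) -> tuple:
--     """Return wall segments as ``((x1, y1), (x2, y2))`` in tile units.
--
--     Returns ``(internal_segments, outer_segments)`` where *internal* are
--     shared edges between adjacent tiles and *outer* lie on the boundary.
--     """
--     internal: list[tuple[tuple[int, int], tuple[int, int]]] = []
--     outer: list[tuple[tuple[int, int], tuple[int, int]]] = []
--     n = len(tiles)
--
--     # Internal edges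
--     for i in range(n):
--         xi, yi, si = tiles[i]
--         for j in range(i + 1, n):
--             xj, yj, sj = tiles[j]
--             # Shared vertical edge
--             if xi + si == xj:
--                 y_lo = max(yi, yj)
--                 y_hi = min(yi + si, yj + sj)
--                 if y_hi > y_lo:
--                     internal.append(((xi + si, y_lo), (xi + si, y_hi)))
--             elif xj + sj == xi:
--                 y_lo = max(yi, yj)
--                 y_hi = min(yi + si, yj + sj)
--                 if y_hi > y_lo:
--                     internal.append(((xi, y_lo), (xi, y_hi)))
--             # Shared horizontal edge
--             if yi + si == yj:
--                 x_lo = max(xi, xj)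
--                 x_hi = min(xi + si, xj + sj)
--                 if x_hi > x_lo:
--                     internal.append(((x_lo, yi + si), (x_hi, yi + si)))
--             elif yj + sj == yi:
--                 x_lo = max(xi, xj)
--                 x_hi = min(xi + si, xj + sj)
--                 if x_hi > x_lo:
--                     internal.append(((x_lo, yi), (x_hi, yi)))
--
--     # Outer boundary edges
--     for x, y, s in tiles:
--         if x == 0:
--             outer.append(((0, y), (0, y + s)))
--         if x + s == size:
--             outer.append(((size, y), (size, y + s)))
--         if y == 0:
--             outer.append(((x, 0), (x + s, 0)))
--         if y + s == size:
--             outer.append(((x, y + s), (x + s, y + s)))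
--
--     return internal, outer
-- ===== SOURCE B (Python) =====
-- def _pair_walls(ti, tj):
--     """Wall segments shared by tiles ti and tj (ti first in list order)."""
--     xi, yi, si = ti
--     xj, yj, sj = tj
--     out = []
--     if xi + si == xj:
--         lo, hi = max(yi, yj), min(yi + si, yj + sj)
--         if hi > lo:
--             out.append(((xi + si, lo), (xi + si, hi)))
--     elif xj + sj == xi:
--         lo, hi = max(yi, yj), min(yi + si, yj + sj)
--         if hi > lo:
--             out.append(((xi, lo), (xi, hi)))
--     if yi + si == yj:
--         lo, hi = max(xi, xj), min(xi + si, xj + sj)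
--         if hi > lo:
--             out.append(((lo, yi + si), (hi, yi + si)))
--     elif yj + sj == yi:
--         lo, hi = max(xi, xj), min(xi + si, xj + sj)
--         if hi > lo:
--             out.append(((lo, yi), (hi, yi)))
--     return out
--
--
-- def _bucket(tiles, key):
--     d = {}
--     for j, t in enumerate(tiles):
--         d.setdefault(key(t), []).append(j)
--     return d
--
--
-- def _tile_border(size, t):
--     x, y, s = t
--     out = []
--     if x == 0:
--         out.append(((0, y), (0, y + s)))
--     if x + s == size:
--         out.append(((size, y), (size, y + s)))
--     if y == 0:
--         out.append(((x, 0), (x + s, 0)))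
--     if y + s == size:
--         out.append(((x, y + s), (x + s, y + s)))
--     return out
--
--
-- def _compute_wall_segments(size, tiles):
--     by_left = _bucket(tiles, lambda t: t[0])
--     by_right = _bucket(tiles, lambda t: t[0] + t[2])
--     by_bottom = _bucket(tiles, lambda t: t[1])
--     by_top = _bucket(tiles, lambda t: t[1] + t[2])
--
--     internal = []
--     for i, ti in enumerate(tiles):
--         xi, yi, si = ti
--         cands = (by_left.get(xi + si, []) + by_right.get(xi, [])
--                  + by_bottom.get(yi + si, []) + by_top.get(yi, []))
--         for j in sorted({j for j in cands if j > i}):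
--             internal.extend(_pair_walls(ti, tiles[j]))
--
--     outer = [seg for t in tiles for seg in _tile_border(size, t)]
--     return internal, outer
-- ===== Notes on version B (the rewrite author's own statement) =====
-- stated objective: faster
-- what changed: Replaces A's all-pairs O(n^2) scan for shared edges by four hash indexes keyed on edge coordinates built in one pass; each tile looks up only its adjacency candidates and visits them sorted by index to preserve A's output order.
import Mathlib
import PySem

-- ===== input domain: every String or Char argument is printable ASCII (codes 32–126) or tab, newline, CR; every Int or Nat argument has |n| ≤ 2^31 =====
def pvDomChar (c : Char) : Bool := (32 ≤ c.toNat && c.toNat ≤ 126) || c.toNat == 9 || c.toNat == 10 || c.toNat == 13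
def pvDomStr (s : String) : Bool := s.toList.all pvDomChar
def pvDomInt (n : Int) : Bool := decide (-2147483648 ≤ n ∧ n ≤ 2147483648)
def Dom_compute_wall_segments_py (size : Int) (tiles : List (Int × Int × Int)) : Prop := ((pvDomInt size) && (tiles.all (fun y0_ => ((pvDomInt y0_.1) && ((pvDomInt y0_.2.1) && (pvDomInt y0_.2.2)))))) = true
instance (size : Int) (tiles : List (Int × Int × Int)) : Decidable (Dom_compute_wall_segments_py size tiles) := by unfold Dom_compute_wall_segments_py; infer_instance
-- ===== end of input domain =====

-- B replaces A's all-pairs scan by four coordinate-keyed indexes (one pass) plus a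
-- sorted candidate lookup per tile; objective: faster (asymptotic).


-- ===== PORT A =====
def compute_wall_segments_py (size : Int) (tiles : List (Int × Int × Int)) : (List ((Int × Int) × (Int × Int))) × (List ((Int × Int) × (Int × Int))) :=
  let n : Int := PySem.List.len tiles
  let internal : List ((Int × Int) × (Int × Int)) :=
    (PySem.List.pyRange 0 n 1).foldl (fun acc i =>
      match PySem.List.pyGet? tiles i with
      | none => acc
      | some (xi, yi, si) =>
        (PySem.List.pyRange (i + 1) n 1).foldl (fun acc j =>
          match PySem.List.pyGet? tiles j with
          | none => acc
          | some (xj, yj, sj) =>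
            let acc :=
              if xi + si = xj then
                let y_lo := max yi yj
                let y_hi := min (yi + si) (yj + sj)
                if y_hi > y_lo then acc ++ [((xi + si, y_lo), (xi + si, y_hi))] else acc
              else if xj + sj = xi then
                let y_lo := max yi yj
                let y_hi := min (yi + si) (yj + sj)
                if y_hi > y_lo then acc ++ [((xi, y_lo), (xi, y_hi))] else acc
              else acc
            if yi + si = yj then
              let x_lo := max xi xj
              let x_hi := min (xi + si) (xj + sj)
              if x_hi > x_lo then acc ++ [((x_lo, yi + si), (x_hi, yi + si))] else acc
            else if yj + sj = yi then
              let x_lo := max xi xj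
              let x_hi := min (xi + si) (xj + sj)
              if x_hi > x_lo then acc ++ [((x_lo, yi), (x_hi, yi))] else acc
            else acc) acc) []
  let outer : List ((Int × Int) × (Int × Int)) :=
    tiles.foldl (fun acc t =>
      let (x, y, s) := t
      let acc := if x = 0 then acc ++ [((0, y), (0, y + s))] else acc
      let acc := if x + s = size then acc ++ [((size, y), (size, y + s))] else acc
      let acc := if y = 0 then acc ++ [((x, 0), (x + s, 0))] else acc
      if y + s = size then acc ++ [((x, y + s), (x + s, y + s))] else acc) []
  (internal, outer)

-- ===== PORT B =====
-- helper: wall segments shared by ti and tj (Source B's _pair_walls)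
def pvPairWalls (ti tj : Int × Int × Int) : List ((Int × Int) × (Int × Int)) :=
  let (xi, yi, si) := ti
  let (xj, yj, sj) := tj
  let vert : List ((Int × Int) × (Int × Int)) :=
    if xi + si = xj then
      let lo := max yi yj
      let hi := min (yi + si) (yj + sj)
      if hi > lo then [((xi + si, lo), (xi + si, hi))] else []
    else if xj + sj = xi then
      let lo := max yi yj
      let hi := min (yi + si) (yj + sj)
      if hi > lo then [((xi, lo), (xi, hi))] else []
    else []
  let horiz : List ((Int × Int) × (Int × Int)) :=
    if yi + si = yj then
      let lo := max xi xj
      let hi := min (xi + si) (xj + sj)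
      if hi > lo then [((lo, yi + si), (hi, yi + si))] else []
    else if yj + sj = yi then
      let lo := max xi xj
      let hi := min (xi + si) (xj + sj)
      if hi > lo then [((lo, yi), (hi, yi))] else []
    else []
  vert ++ horiz

-- helper: coordinate-keyed index of tile positions (Source B's _bucket)
def pvBucket (tiles : List (Int × Int × Int)) (key : Int × Int × Int → Int) : PySem.Dict Int (List Int) :=
  (PySem.List.enumerate tiles 0).foldl (fun d p => d.modify (key p.2) [] (· ++ [p.1])) PySem.Dict.empty

-- helper: boundary segments of one tile (Source B's _tile_border)
def pvTileBorder (size : Int) (t : Int × Int × Int) : List ((Int × Int) × (Int × Int)) :=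
  let (x, y, s) := t
  (if x = 0 then [((0, y), (0, y + s))] else []) ++
  (if x + s = size then [((size, y), (size, y + s))] else []) ++
  (if y = 0 then [((x, 0), (x + s, 0))] else []) ++
  (if y + s = size then [((x, y + s), (x + s, y + s))] else [])

def compute_wall_segments_py_alt (size : Int) (tiles : List (Int × Int × Int)) : (List ((Int × Int) × (Int × Int))) × (List ((Int × Int) × (Int × Int))) :=
  let by_left := pvBucket tiles (fun t => t.1)
  let by_right := pvBucket tiles (fun t => t.1 + t.2.2)
  let by_bottom := pvBucket tiles (fun t => t.2.1)
  let by_top := pvBucket tiles (fun t => t.2.1 + t.2.2)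
  let internal : List ((Int × Int) × (Int × Int)) :=
    (PySem.List.enumerate tiles 0).foldl (fun acc p =>
      let i := p.1
      let ti := p.2
      let cands := by_left.getD (ti.1 + ti.2.2) [] ++ by_right.getD ti.1 [] ++
                   by_bottom.getD (ti.2.1 + ti.2.2) [] ++ by_top.getD ti.2.1 []
      let nbrs := PySem.List.sorted (PySem.Set.ofList (cands.filter (fun j => decide (i < j)))) (fun j => j) false
      nbrs.foldl (fun acc j =>
        match PySem.List.pyGet? tiles j with
        | none => acc
        | some tj => acc ++ pvPairWalls ti tj) acc) []
  let outer : List ((Int × Int) × (Int × Int)) := tiles.flatMap (pvTileBorder size)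
  (internal, outer)

-- ===== PRECONDITION & SPEC =====
def Spec_compute_wall_segments_py (size : Int) (tiles : List (Int × Int × Int)) (out : (List ((Int × Int) × (Int × Int))) × (List ((Int × Int) × (Int × Int)))) : Prop := out = compute_wall_segments_py_alt size tiles
instance (size : Int) (tiles : List (Int × Int × Int)) (out : (List ((Int × Int) × (Int × Int))) × (List ((Int × Int) × (Int × Int)))) : Decidable (Spec_compute_wall_segments_py size tiles out) := by unfold Spec_compute_wall_segments_py; infer_instance

-- ===== CLAIM (what is proved, stated in full; the proofs are below) =====
def Claim_equal_compute_wall_segments_py : Prop := ∀ (size : Int) (tiles : List (Int × Int × Int)), Dom_compute_wall_segments_py size tiles → Spec_compute_wall_segments_py size tiles (compute_wall_segments_py size tiles)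


-- ===== LEMMAS AND PROOFS =====

-- generic: a foldl whose body ignores elements failing p is a foldl over the filtered list
theorem pv_foldl_filter {A B : Type} (l : List A) (p : A → Bool) (f : B → A → B) (init : B)
    (h : ∀ acc x, x ∈ l → p x = false → f acc x = acc) :
    l.foldl f init = (l.filter p).foldl f init := by
  induction l generalizing init with
  | nil => rfl
  | cons a t ih =>
    by_cases hp : p a = true
    · simp only [List.foldl_cons, List.filter_cons, hp, if_pos]
      exact ih (f init a) (fun acc x hx => h acc x (List.mem_cons_of_mem _ hx))
    · have hpa : p a = false := by simpa using hp
      simp only [List.foldl_cons, List.filter_cons, hpa, Bool.false_eq_true, if_false,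
        h init a (List.mem_cons_self) hpa]
      exact ih init (fun acc x hx => h acc x (List.mem_cons_of_mem _ hx))

-- adjacency condition between tile ti and tiles[j] (proof-side only)
def pvCond (tiles : List (Int × Int × Int)) (ti : Int × Int × Int) (j : Int) : Bool :=
  match PySem.List.pyGet? tiles j with
  | none => false
  | some tj => (ti.1 + ti.2.2 == tj.1) || (tj.1 + tj.2.2 == ti.1) ||
               (ti.2.1 + ti.2.2 == tj.2.1) || (tj.2.1 + tj.2.2 == ti.2.1)

-- A's per-pair body builds exactly acc ++ pvPairWalls ti tj
theorem pv_abody_eq (xi yi si xj yj sj : Int) (acc : List ((Int × Int) × (Int × Int))) :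
    (let acc2 :=
        if xi + si = xj then
          (if min (yi + si) (yj + sj) > max yi yj then
            acc ++ [((xi + si, max yi yj), (xi + si, min (yi + si) (yj + sj)))] else acc)
        else if xj + sj = xi then
          (if min (yi + si) (yj + sj) > max yi yj then
            acc ++ [((xi, max yi yj), (xi, min (yi + si) (yj + sj)))] else acc)
        else acc
      if yi + si = yj then
        (if min (xi + si) (xj + sj) > max xi xj then
          acc2 ++ [((max xi xj, yi + si), (min (xi + si) (xj + sj), yi + si))] else acc2)
      else if yj + sj = yi then
        (if min (xi + si) (xj + sj) > max xi xj then
          acc2 ++ [((max xi xj, yi), (min (xi + si) (xj + sj), yi))] else acc2)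
      else acc2) = acc ++ pvPairWalls (xi, yi, si) (xj, yj, sj) := by
  simp only [pvPairWalls]
  split_ifs <;> simp

-- bucket lookup characterised as a filtered enumeration
theorem pv_bucket_getD (tiles : List (Int × Int × Int)) (key : Int × Int × Int → Int) (c : Int) :
    (pvBucket tiles key).getD c [] =
      ((PySem.List.enumerate tiles 0).filter (fun p => key p.2 == c)).map (fun p => p.1) := by
  unfold pvBucket
  rw [← List.foldl_map (f := fun p : Int × (Int × Int × Int) => (key p.2, p.1))
       (g := fun d (q : Int × Int) => PySem.Dict.modify d q.1 [] (· ++ [q.2]))]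
  rw [PySem.Dict.getD_foldl_modify_append]
  simp [List.filter_map, Function.comp_def]

theorem pv_bucket_mem (tiles : List (Int × Int × Int)) (key : Int × Int × Int → Int) (c j : Int) :
    j ∈ (pvBucket tiles key).getD c [] ↔
      ∃ k : Nat, ∃ _ : k < tiles.length, j = (k : Int) ∧ key tiles[k] = c := by
  rw [pv_bucket_getD]
  simp only [List.mem_map, List.mem_filter, PySem.List.mem_enumerate_iff]
  constructor
  · rintro ⟨p, ⟨⟨k, hk, rfl⟩, hkey⟩, rfl⟩
    exact ⟨k, hk, by simpa using hkey⟩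
  · rintro ⟨k, hk, rfl, hkey⟩
    exact ⟨((k : Int), tiles[k]), ⟨⟨k, hk, by simp⟩, by simpa using hkey⟩, rfl⟩

theorem pvCond_iff (tiles : List (Int × Int × Int)) (ti : Int × Int × Int) (j : Int)
    (h0 : 0 ≤ j) (h1 : j < (tiles.length : Int)) :
    pvCond tiles ti j = true ↔
      ∃ k : Nat, ∃ _ : k < tiles.length, j = (k : Int) ∧
        (ti.1 + ti.2.2 = tiles[k].1 ∨ tiles[k].1 + tiles[k].2.2 = ti.1 ∨
         ti.2.1 + ti.2.2 = tiles[k].2.1 ∨ tiles[k].2.1 + tiles[k].2.2 = ti.2.1) := by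
  have hlt : j.toNat < tiles.length := by omega
  have hg : PySem.List.pyGet? tiles j = some tiles[j.toNat] :=
    PySem.List.pyGet?_eq_some_getElem tiles h0 (by simpa using h1)
  constructor
  · intro hc
    refine ⟨j.toNat, hlt, by omega, ?_⟩
    simp only [pvCond, hg] at hc
    simpa [or_assoc] using hc
  · rintro ⟨k, hk, hjk, hd⟩
    have hk' : j.toNat = k := by omega
    simp only [pvCond, hg, hk']
    simpa [or_assoc] using hd

theorem pv_nbrs_eq (tiles : List (Int × Int × Int)) (i : Int) (hi : 0 ≤ i) (ti : Int × Int × Int) :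
    PySem.List.sorted (PySem.Set.ofList
        (((pvBucket tiles (fun t => t.1)).getD (ti.1 + ti.2.2) [] ++
          (pvBucket tiles (fun t => t.1 + t.2.2)).getD ti.1 [] ++
          (pvBucket tiles (fun t => t.2.1)).getD (ti.2.1 + ti.2.2) [] ++
          (pvBucket tiles (fun t => t.2.1 + t.2.2)).getD ti.2.1 []).filter
            (fun j => decide (i < j)))) (fun j => j) false =
      (PySem.List.pyRange (i + 1) (PySem.List.len tiles) 1).filter (pvCond tiles ti) := by
  apply PySem.List.sorted_eq_of_perm_of_pairwise_lt
  · rw [List.perm_ext_iff_of_nodup ((PySem.List.nodup_pyRange_one _ _).filter _)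
        (PySem.Set.nodup_ofList _)]
    intro j
    simp only [List.mem_filter, PySem.Set.mem_ofList, List.mem_append, pv_bucket_mem,
      PySem.List.mem_pyRange_one, PySem.List.len_eq, decide_eq_true_eq]
    constructor
    · rintro ⟨⟨hlo, hhi⟩, hc⟩
      obtain ⟨k, hk, hjk, hd⟩ := (pvCond_iff tiles ti j (by omega) hhi).mp hc
      refine ⟨?_, by omega⟩
      rcases hd with h | h | h | h
      · exact Or.inl (Or.inl (Or.inl ⟨k, hk, hjk, h.symm⟩))
      · exact Or.inl (Or.inl (Or.inr ⟨k, hk, hjk, h⟩))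
      · exact Or.inl (Or.inr ⟨k, hk, hjk, h.symm⟩)
      · exact Or.inr ⟨k, hk, hjk, h⟩
    · rintro ⟨hmem, hij⟩
      have key : ∃ k : Nat, ∃ _ : k < tiles.length, j = (k : Int) ∧
          (ti.1 + ti.2.2 = tiles[k].1 ∨ tiles[k].1 + tiles[k].2.2 = ti.1 ∨
           ti.2.1 + ti.2.2 = tiles[k].2.1 ∨ tiles[k].2.1 + tiles[k].2.2 = ti.2.1) := by
        rcases hmem with (((⟨k, hk, hjk, h⟩ | ⟨k, hk, hjk, h⟩) | ⟨k, hk, hjk, h⟩) | ⟨k, hk, hjk, h⟩)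
        exacts [⟨k, hk, hjk, Or.inl h.symm⟩, ⟨k, hk, hjk, Or.inr (Or.inl h)⟩,
          ⟨k, hk, hjk, Or.inr (Or.inr (Or.inl h.symm))⟩, ⟨k, hk, hjk, Or.inr (Or.inr (Or.inr h))⟩]
      obtain ⟨k, hk, hjk, -⟩ := id key
      exact ⟨⟨by omega, by omega⟩, (pvCond_iff tiles ti j (by omega) (by omega)).mpr key⟩
  · exact (PySem.List.pairwise_lt_pyRange_one _ _).filter _

-- equality of the internal lists
theorem pv_internal_eq (size : Int) (tiles : List (Int × Int × Int)) :
    (compute_wall_segments_py size tiles).1 = (compute_wall_segments_py_alt size tiles).1 := by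
  simp only [compute_wall_segments_py, compute_wall_segments_py_alt]
  rw [PySem.List.enumerate_eq_map_pyRange tiles ((0 : Int), (0 : Int), (0 : Int))]
  rw [List.foldl_map]
  apply PySem.List.foldl_congr_mem
  intro acc i himem
  have hb := PySem.List.mem_pyRange_one.mp himem
  have h0 : 0 ≤ i := hb.1
  have h1 : i < (tiles.length : Int) := by simpa using hb.2
  rw [PySem.List.pyGet?_eq_some_getElem tiles h0 h1,
      PySem.List.pyGetD_eq_getElem tiles ((0 : Int), (0 : Int), (0 : Int)) h0 h1]
  rw [pv_nbrs_eq tiles i h0 (tiles[i.toNat])]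
  generalize tiles[i.toNat] = ti
  obtain ⟨xi, yi, si⟩ := ti
  dsimp only
  rw [pv_foldl_filter (PySem.List.pyRange (i + 1) (PySem.List.len tiles) 1)
      (pvCond tiles (xi, yi, si)) _ acc ?hid]
  case hid =>
    intro acc j _ hcf
    cases hg : PySem.List.pyGet? tiles j with
    | none => rfl
    | some tj =>
      obtain ⟨xj, yj, sj⟩ := tj
      simp only [pvCond, hg, Bool.or_eq_false_iff, beq_eq_false_iff_ne, ne_eq] at hcf
      obtain ⟨⟨⟨n1, n2⟩, n3⟩, n4⟩ := hcf
      simp [n1, n2, n3, n4]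
  apply PySem.List.foldl_congr_mem
  intro acc j hj
  cases hg : PySem.List.pyGet? tiles j with
  | none => rfl
  | some tj =>
    obtain ⟨xj, yj, sj⟩ := tj
    exact pv_abody_eq xi yi si xj yj sj acc

-- A's per-tile boundary body builds exactly acc ++ pvTileBorder size t
theorem pv_outer_body (size : Int) (acc : List ((Int × Int) × (Int × Int))) (t : Int × Int × Int) :
    (let (x, y, s) := t
     let acc := if x = 0 then acc ++ [((0, y), (0, y + s))] else acc
     let acc := if x + s = size then acc ++ [((size, y), (size, y + s))] else acc
     let acc := if y = 0 then acc ++ [((x, 0), (x + s, 0))] else acc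
     if y + s = size then acc ++ [((x, y + s), (x + s, y + s))] else acc)
    = acc ++ pvTileBorder size t := by
  obtain ⟨x, y, s⟩ := t
  simp only [pvTileBorder]
  split_ifs <;> simp

-- equality of the outer lists
theorem pv_outer_eq (size : Int) (tiles : List (Int × Int × Int)) :
    (compute_wall_segments_py size tiles).2 = (compute_wall_segments_py_alt size tiles).2 := by
  simp only [compute_wall_segments_py, compute_wall_segments_py_alt]
  rw [PySem.List.foldl_congr_mem _ _ (fun acc t => acc ++ pvTileBorder size t) []
      (fun acc t _ => pv_outer_body size acc t)]
  rw [PySem.List.foldl_append_eq_flatMap]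
  simp

-- ===== VERDICT (by name: the statement is the Claim_ definition above) =====
theorem compute_wall_segments_py_spec : Claim_equal_compute_wall_segments_py := by
  intro size tiles _
  unfold Spec_compute_wall_segments_py
  exact Prod.ext (pv_internal_eq size tiles) (pv_outer_eq size tiles)
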